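-- pv_equiv track=rewrite | github.com/Lokno/aoc2020 | day20.py | flip_grid
-- ===== SOURCE A (Python) =====
-- from itertools import product,permutations
--
-- def flip_grid( grid, w, h, we, ns ):
--     if we:
--         for x,y in product(range(int(w/2)),range(h)):
--             ia = y*w+x
--             ib = y*w+w-1-x
--             tmp = grid[ia]
--             grid[ia] = grid[ib]
--             grid[ib] = tmp
--
--     if ns:
--         for x,y in product(range(w),range(int(h/2))):
--             ia = y*w+x
--             ib = (h-1-y)*w+x
--             tmp = grid[ia]
--             grid[ia] = grid[ib]
--             grid[ib] = tmp
--
--     return grid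
-- ===== SOURCE B (Python) =====
-- def flip_grid(grid, w, h, we, ns):
--     if not we and not ns:
--         return grid
--     if w <= 0 or h <= 0:
--         return grid
--     rows = [[grid[y * w + x] for x in range(w)] for y in range(h)]
--     if we:
--         rows = [row[::-1] for row in rows]
--     if ns:
--         rows.reverse()
--     i = 0
--     for row in rows:
--         for c in row:
--             grid[i] = c
--             i += 1
--     return grid
-- ===== Notes on version B (the rewrite author's own statement) =====
-- stated objective: simpler
-- what changed: A flips in place with two nested index-swap loops over mirrored cell pairs; B returns immediately when nothing is to be flipped and otherwise decomposes the flat grid into rows, reverses each row (we) and/or the row order (ns), then writes the flattened rows back into the list.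
-- outside the precondition, e.g. on flip_grid(['a'], 1, 2, True, False): A returns ['a'], B raises IndexError
import Mathlib
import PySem

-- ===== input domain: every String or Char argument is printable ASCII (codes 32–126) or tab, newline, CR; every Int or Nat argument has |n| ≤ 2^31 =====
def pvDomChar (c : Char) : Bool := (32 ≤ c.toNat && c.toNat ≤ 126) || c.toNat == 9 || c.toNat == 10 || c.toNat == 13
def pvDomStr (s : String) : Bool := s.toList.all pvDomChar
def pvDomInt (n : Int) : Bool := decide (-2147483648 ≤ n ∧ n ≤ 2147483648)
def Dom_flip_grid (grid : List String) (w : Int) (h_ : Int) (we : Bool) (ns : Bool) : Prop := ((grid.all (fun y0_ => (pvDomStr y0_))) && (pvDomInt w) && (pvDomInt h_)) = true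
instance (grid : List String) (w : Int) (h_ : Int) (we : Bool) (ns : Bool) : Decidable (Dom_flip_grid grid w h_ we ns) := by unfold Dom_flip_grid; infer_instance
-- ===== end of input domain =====

-- B replaces A's two nested mirror-swap loops by a row decomposition (reverse each row / the
-- row order, then write the flattened rows back); objective: simpler. Both A and B mutate the
-- grid list in place in Python to the same final content; the theorems are about the returned value.

-- ===== PORT A =====
-- int(w/2): w/2 is an exact binary float for |w| ≤ 2^31, and int() truncates toward zero = Int.tdiv.
def flip_grid (grid : List String) (w : Int) (h_ : Int) (we : Bool) (ns : Bool) : List String :=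
  let g1 :=
    if we then
      ((PySem.List.pyRange 0 (Int.tdiv w 2) 1).flatMap (fun x =>
          (PySem.List.pyRange 0 h_ 1).map (fun y => (x, y)))).foldl
        (fun g xy =>
          let ia := xy.2 * w + xy.1
          let ib := xy.2 * w + w - 1 - xy.1
          let tmp := PySem.List.pyGetD g ia ""
          let g' := PySem.List.pySetD g ia (PySem.List.pyGetD g ib "")
          PySem.List.pySetD g' ib tmp) grid
    else grid
  if ns then
    ((PySem.List.pyRange 0 w 1).flatMap (fun x =>
        (PySem.List.pyRange 0 (Int.tdiv h_ 2) 1).map (fun y => (x, y)))).foldl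
      (fun g xy =>
        let ia := xy.2 * w + xy.1
        let ib := (h_ - 1 - xy.2) * w + xy.1
        let tmp := PySem.List.pyGetD g ia ""
        let g' := PySem.List.pySetD g ia (PySem.List.pyGetD g ib "")
        PySem.List.pySetD g' ib tmp) g1
  else g1

-- ===== PORT B =====
def flip_grid_alt (grid : List String) (w : Int) (h_ : Int) (we : Bool) (ns : Bool) : List String :=
  if !we && !ns then grid else
  if w ≤ 0 ∨ h_ ≤ 0 then grid else
  let rows := (PySem.List.pyRange 0 h_ 1).map (fun y =>
      (PySem.List.pyRange 0 w 1).map (fun x => PySem.List.pyGetD grid (y * w + x) ""))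
  let rows := if we then rows.map (fun row => row.reverse) else rows
  let rows := if ns then rows.reverse else rows
  (rows.foldl (fun (st : List String × Int) row =>
      row.foldl (fun st c => (PySem.List.pySetD st.1 st.2 c, st.2 + 1)) st) (grid, 0)).1

-- ===== PRECONDITION & SPEC =====
-- Pre_ excludes inputs with a flip flag set and positive w and h_ whose list length differs from
-- w*h_: there the flat list is not a w×h_ grid, A happens to return an accidental partial flip or
-- raises IndexError, and B may raise; no-op inputs (both flags false, or w ≤ 0, or h_ ≤ 0) stay inside Pre_.
def Pre_flip_grid (grid : List String) (w : Int) (h_ : Int) (we : Bool) (ns : Bool) : Prop :=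
  (we = false ∧ ns = false) ∨ w ≤ 0 ∨ h_ ≤ 0 ∨ (grid.length : Int) = w * h_
instance (grid : List String) (w : Int) (h_ : Int) (we : Bool) (ns : Bool) : Decidable (Pre_flip_grid grid w h_ we ns) := by unfold Pre_flip_grid; infer_instance
def pvWitness_flip_grid : List String × Int × Int × Bool × Bool := (["a", "b", "c", "d", "e", "f"], 3, 2, true, true)

def Spec_flip_grid (grid : List String) (w : Int) (h_ : Int) (we : Bool) (ns : Bool) (out : List String) : Prop := out = flip_grid_alt grid w h_ we ns
instance (grid : List String) (w : Int) (h_ : Int) (we : Bool) (ns : Bool) (out : List String) : Decidable (Spec_flip_grid grid w h_ we ns out) := by unfold Spec_flip_grid; infer_instance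

-- ===== CLAIM (what is proved, stated in full; the proofs are below) =====
def Claim_equal_flip_grid : Prop := ∀ (grid : List String) (w : Int) (h_ : Int) (we : Bool) (ns : Bool), Dom_flip_grid grid w h_ we ns → Pre_flip_grid grid w h_ we ns → Spec_flip_grid grid w h_ we ns (flip_grid grid w h_ we ns)


-- ===== LEMMAS AND PROOFS =====

-- Nat-level view of a cell read/write and of A's loops.
def nget (g : List String) (i : Nat) : String := g.getD i ""
def nswap (g : List String) (i j : Nat) : List String := (g.set i (nget g j)).set j (nget g i)
def weInner (W a m : Nat) (g : List String) : List String :=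
  (List.range m).foldl (fun g y => nswap g (y*W+a) (y*W+(W-1-a))) g
def weLoop (W H k : Nat) (g : List String) : List String :=
  (List.range k).foldl (fun g a => weInner W a H g) g
def nsInner (W H a m : Nat) (g : List String) : List String :=
  (List.range m).foldl (fun g y => nswap g (y*W+a) ((H-1-y)*W+a)) g
def nsLoop (W H k : Nat) (g : List String) : List String :=
  (List.range k).foldl (fun g a => nsInner W H a (H/2) g) g
-- Nat-level view of B's rows.
def bRow (grid : List String) (W y : Nat) : List String :=
  (List.range W).map (fun x => nget grid (y*W+x))
def bRows (grid : List String) (W H : Nat) : List (List String) :=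
  (List.range H).map (bRow grid W)

theorem length_nswap (g : List String) (i j : Nat) : (nswap g i j).length = g.length := by
  simp [nswap]

theorem nget_nswap (g : List String) (i j k : Nat) (hi : i < g.length) (hj : j < g.length) :
    nget (nswap g i j) k = if k = j then nget g i else if k = i then nget g j else nget g k := by
  unfold nswap
  by_cases hkj : k = j
  · subst hkj
    simp only [nget, List.getD_eq_getElem?_getD, List.getElem?_set, List.length_set]
    simp [hj]
  · by_cases hki : k = i
    · subst hki
      simp only [nget, List.getD_eq_getElem?_getD, List.getElem?_set, List.length_set]
      simp [hi, Ne.symm hkj, hkj]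
    · simp only [nget, List.getD_eq_getElem?_getD, List.getElem?_set, List.length_set]
      simp [Ne.symm hkj, Ne.symm hki, hkj, hki]

theorem cell_inj {W y y' x x' : Nat} (hx : x < W) (hx' : x' < W) :
    y*W+x = y'*W+x' ↔ y = y' ∧ x = x' := by
  constructor
  · intro h
    have hy : y = y' := by
      by_contra hne
      rcases Nat.lt_or_ge y y' with hlt | hge
      · have h1 : (y+1)*W ≤ y'*W := Nat.mul_le_mul_right _ hlt
        have : y*W + W ≤ y'*W := by nlinarith
        omega
      · have hlt : y' < y := by omega
        have h1 : (y'+1)*W ≤ y*W := Nat.mul_le_mul_right _ hlt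
        have : y'*W + W ≤ y*W := by nlinarith
        omega
    subst hy; omega
  · rintro ⟨rfl, rfl⟩; rfl

theorem length_weInner (W a m : Nat) (g : List String) : (weInner W a m g).length = g.length := by
  induction m with
  | zero => simp [weInner]
  | succ m ih =>
    simp only [weInner, List.range_succ, List.foldl_append, List.foldl_cons, List.foldl_nil] at *
    rw [length_nswap, ih]

theorem weInner_succ (W a m : Nat) (g : List String) :
    weInner W a (m+1) g = nswap (weInner W a m g) (m*W+a) (m*W+(W-1-a)) := by
  simp [weInner, List.range_succ, List.foldl_append]

theorem nget_weInner (W H a : Nat) (g : List String) (hlen : g.length = W*H)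
    (ha : a + 1 < W - a) :
    ∀ m, m ≤ H → ∀ y x, y < H → x < W →
    nget (weInner W a m g) (y*W+x) =
      if y < m ∧ x = a then nget g (y*W+(W-1-a))
      else if y < m ∧ x = W-1-a then nget g (y*W+a)
      else nget g (y*W+x) := by
  intro m
  induction m with
  | zero =>
    intro _ y x _ _
    simp only [weInner, List.range_zero, List.foldl_nil]
    rw [if_neg (by omega), if_neg (by omega)]
  | succ m ih =>
    intro hm y x hy hx
    have hm' : m ≤ H := by omega
    have hlen' : (weInner W a m g).length = W*H := by rw [length_weInner, hlen]
    have hbound : m*W + W ≤ W*H := by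
      have : (m+1)*W ≤ H*W := Nat.mul_le_mul_right _ (by omega)
      nlinarith
    have hilt : m*W+a < (weInner W a m g).length := by omega
    have hjlt : m*W+(W-1-a) < (weInner W a m g).length := by omega
    rw [weInner_succ, nget_nswap _ _ _ _ hilt hjlt]
    have e1 : (y*W+x = m*W+(W-1-a)) ↔ (y = m ∧ x = W-1-a) := cell_inj hx (by omega)
    have e2 : (y*W+x = m*W+a) ↔ (y = m ∧ x = a) := cell_inj hx (by omega)
    by_cases hc1 : y = m ∧ x = W-1-a
    · rw [if_pos (e1.mpr hc1)]
      obtain ⟨rfl, rfl⟩ := hc1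
      rw [ih hm' y a hy (by omega)]
      rw [if_neg (by omega), if_neg (by omega)]
      rw [if_neg (by omega), if_pos ⟨by omega, rfl⟩]
    · rw [if_neg (fun hh => hc1 (e1.mp hh))]
      by_cases hc2 : y = m ∧ x = a
      · rw [if_pos (e2.mpr hc2)]
        obtain ⟨rfl, rfl⟩ := hc2
        rw [ih hm' y (W-1-x) hy (by omega)]
        rw [if_neg (by omega), if_neg (by omega)]
        rw [if_pos ⟨by omega, rfl⟩]
      · rw [if_neg (fun hh => hc2 (e2.mp hh))]
        rw [ih hm' y x hy hx]
        split_ifs <;> first | rfl | omega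

theorem length_weLoop (W H k : Nat) (g : List String) : (weLoop W H k g).length = g.length := by
  induction k with
  | zero => simp [weLoop]
  | succ k ih =>
    simp only [weLoop, List.range_succ, List.foldl_append, List.foldl_cons, List.foldl_nil] at *
    rw [length_weInner, ih]

theorem weLoop_succ (W H k : Nat) (g : List String) :
    weLoop W H (k+1) g = weInner W k H (weLoop W H k g) := by
  simp [weLoop, List.range_succ, List.foldl_append]

theorem nget_weLoop (W H : Nat) (g : List String) (hlen : g.length = W*H) :
    ∀ k, k ≤ W/2 → ∀ y x, y < H → x < W →
    nget (weLoop W H k g) (y*W+x) =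
      if x < k ∨ W-k ≤ x then nget g (y*W+(W-1-x)) else nget g (y*W+x) := by
  intro k
  induction k with
  | zero =>
    intro _ y x _ hx
    simp only [weLoop, List.range_zero, List.foldl_nil]
    rw [if_neg (by omega)]
  | succ k ih =>
    intro hk y x hy hx
    have hk' : k ≤ W/2 := by omega
    have hlen' : (weLoop W H k g).length = W*H := by rw [length_weLoop, hlen]
    have hka : k + 1 < W - k := by omega
    rw [weLoop_succ, nget_weInner W H k _ hlen' hka H le_rfl y x hy hx]
    by_cases hxk : x = k
    · subst hxk
      rw [if_pos ⟨hy, rfl⟩]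
      rw [ih hk' y (W-1-x) hy (by omega)]
      rw [if_neg (by omega)]
      rw [if_pos (by omega)]
    · by_cases hxb : x = W-1-k
      · rw [if_neg (by omega), if_pos ⟨hy, hxb⟩]
        rw [ih hk' y k hy (by omega)]
        rw [if_neg (by omega), if_pos (by omega)]
        subst hxb
        congr 2
        omega
      · rw [if_neg (by omega), if_neg (by omega)]
        rw [ih hk' y x hy hx]
        split_ifs <;> first | rfl | omega

theorem nget_weLoop_full (W H : Nat) (g : List String) (hlen : g.length = W*H)
    (y x : Nat) (hy : y < H) (hx : x < W) :
    nget (weLoop W H (W/2) g) (y*W+x) = nget g (y*W+(W-1-x)) := by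
  rw [nget_weLoop W H g hlen (W/2) le_rfl y x hy hx]
  by_cases h : x < W/2 ∨ W-(W/2) ≤ x
  · rw [if_pos h]
  · rw [if_neg h]
    have e : W-1-x = x := by omega
    rw [e]

theorem length_nsInner (W H a m : Nat) (g : List String) : (nsInner W H a m g).length = g.length := by
  induction m with
  | zero => simp [nsInner]
  | succ m ih =>
    simp only [nsInner, List.range_succ, List.foldl_append, List.foldl_cons, List.foldl_nil] at *
    rw [length_nswap, ih]

theorem nsInner_succ (W H a m : Nat) (g : List String) :
    nsInner W H a (m+1) g = nswap (nsInner W H a m g) (m*W+a) ((H-1-m)*W+a) := by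
  simp [nsInner, List.range_succ, List.foldl_append]

theorem nget_nsInner (W H a : Nat) (g : List String) (hlen : g.length = W*H) (ha : a < W) :
    ∀ m, m ≤ H/2 → ∀ y x, y < H → x < W →
    nget (nsInner W H a m g) (y*W+x) =
      if x = a ∧ (y < m ∨ H-m ≤ y) then nget g ((H-1-y)*W+a) else nget g (y*W+x) := by
  intro m
  induction m with
  | zero =>
    intro _ y x hy _
    simp only [nsInner, List.range_zero, List.foldl_nil]
    rw [if_neg (by omega)]
  | succ m ih =>
    intro hm y x hy hx
    have hm' : m ≤ H/2 := by omega
    have hlen' : (nsInner W H a m g).length = W*H := by rw [length_nsInner, hlen]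
    have h2m : 2*m + 2 ≤ H := by omega
    have hb1 : m*W+a < (nsInner W H a m g).length := by
      have : (m+1)*W ≤ H*W := Nat.mul_le_mul_right _ (by omega)
      nlinarith
    have hb2 : (H-1-m)*W+a < (nsInner W H a m g).length := by
      have : (H-1-m+1)*W ≤ H*W := Nat.mul_le_mul_right _ (by omega)
      nlinarith
    rw [nsInner_succ, nget_nswap _ _ _ _ hb1 hb2]
    have e1 : (y*W+x = (H-1-m)*W+a) ↔ (y = H-1-m ∧ x = a) := cell_inj hx ha
    have e2 : (y*W+x = m*W+a) ↔ (y = m ∧ x = a) := cell_inj hx ha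
    by_cases hc1 : y = H-1-m ∧ x = a
    · rw [if_pos (e1.mpr hc1)]
      obtain ⟨rfl, rfl⟩ := hc1
      rw [ih hm' m x (by omega) hx]
      rw [if_neg (by omega)]
      have e : H-1-(H-1-m) = m := by omega
      rw [e, if_pos ⟨rfl, by omega⟩]
    · rw [if_neg (fun hh => hc1 (e1.mp hh))]
      by_cases hc2 : y = m ∧ x = a
      · rw [if_pos (e2.mpr hc2)]
        obtain ⟨rfl, rfl⟩ := hc2
        rw [ih hm' (H-1-y) x (by omega) hx]
        rw [if_neg (by omega), if_pos ⟨rfl, by omega⟩]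
      · rw [if_neg (fun hh => hc2 (e2.mp hh))]
        rw [ih hm' y x hy hx]
        split_ifs <;> first | rfl | omega

theorem length_nsLoop (W H k : Nat) (g : List String) : (nsLoop W H k g).length = g.length := by
  induction k with
  | zero => simp [nsLoop]
  | succ k ih =>
    simp only [nsLoop, List.range_succ, List.foldl_append, List.foldl_cons, List.foldl_nil] at *
    rw [length_nsInner, ih]

theorem nsLoop_succ (W H k : Nat) (g : List String) :
    nsLoop W H (k+1) g = nsInner W H k (H/2) (nsLoop W H k g) := by
  simp [nsLoop, List.range_succ, List.foldl_append]

theorem nget_nsLoop (W H : Nat) (g : List String) (hlen : g.length = W*H) :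
    ∀ k, k ≤ W → ∀ y x, y < H → x < W →
    nget (nsLoop W H k g) (y*W+x) =
      if x < k then nget g ((H-1-y)*W+x) else nget g (y*W+x) := by
  intro k
  induction k with
  | zero =>
    intro _ y x _ _
    simp only [nsLoop, List.range_zero, List.foldl_nil]
    rw [if_neg (by omega)]
  | succ k ih =>
    intro hk y x hy hx
    have hk' : k ≤ W := by omega
    have hlen' : (nsLoop W H k g).length = W*H := by rw [length_nsLoop, hlen]
    rw [nsLoop_succ, nget_nsInner W H k _ hlen' (by omega) (H/2) le_rfl y x hy hx]
    by_cases hxk : x = k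
    · subst hxk
      by_cases hyr : y < H/2 ∨ H-(H/2) ≤ y
      · rw [if_pos ⟨rfl, hyr⟩, ih hk' (H-1-y) x (by omega) hx]
        rw [if_neg (by omega), if_pos (by omega)]
      · have hmid : H-1-y = y := by omega
        rw [if_neg (by omega), ih hk' y x hy hx, if_neg (by omega), if_pos (by omega), hmid]
    · rw [if_neg (by omega), ih hk' y x hy hx]
      split_ifs <;> first | rfl | omega

theorem nget_nsLoop_full (W H : Nat) (g : List String) (hlen : g.length = W*H)
    (y x : Nat) (hy : y < H) (hx : x < W) :
    nget (nsLoop W H W g) (y*W+x) = nget g ((H-1-y)*W+x) := by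
  rw [nget_nsLoop W H g hlen W le_rfl y x hy hx, if_pos hx]

-- bridges from the ports to the Nat-level loops

theorem tdiv_cast (W : Nat) : Int.tdiv (W : Int) 2 = ((W/2 : Nat) : Int) :=
  (Int.ofNat_tdiv W 2).symm

theorem bridge_we (grid : List String) (W H : Nat) :
    ((PySem.List.pyRange 0 (Int.tdiv (W : Int) 2) 1).flatMap (fun x =>
        (PySem.List.pyRange 0 (H : Int) 1).map (fun y => (x, y)))).foldl
      (fun g (xy : Int × Int) =>
        PySem.List.pySetD (PySem.List.pySetD g (xy.2 * (W : Int) + xy.1)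
            (PySem.List.pyGetD g (xy.2 * (W : Int) + (W : Int) - 1 - xy.1) ""))
          (xy.2 * (W : Int) + (W : Int) - 1 - xy.1)
          (PySem.List.pyGetD g (xy.2 * (W : Int) + xy.1) "")) grid = weLoop W H (W/2) grid := by
  rw [tdiv_cast, PySem.List.pyRange_zero_nat, PySem.List.pyRange_zero_nat]
  rw [List.foldl_flatMap, List.foldl_map]
  unfold weLoop
  apply PySem.List.foldl_congr_mem
  intro acc a hmem
  have haq : a < W/2 := List.mem_range.mp hmem
  have haW : a + 1 ≤ W := by omega
  rw [List.map_map, List.foldl_map]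
  unfold weInner
  apply PySem.List.foldl_congr_mem
  intro g b _
  have eia : (b : Int) * (W : Int) + (a : Int) = ((b*W+a : Nat) : Int) := by push_cast; ring
  have eib : (b : Int) * (W : Int) + (W : Int) - 1 - (a : Int) = ((b*W+(W-1-a) : Nat) : Int) := by
    have e : ((b*W : Nat) : Int) = (b : Int) * (W : Int) := by push_cast; ring
    omega
  show PySem.List.pySetD (PySem.List.pySetD g ((b:Int)*(W:Int)+(a:Int))
        (PySem.List.pyGetD g ((b:Int)*(W:Int)+(W:Int)-1-(a:Int)) ""))
      ((b:Int)*(W:Int)+(W:Int)-1-(a:Int)) (PySem.List.pyGetD g ((b:Int)*(W:Int)+(a:Int)) "")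
    = nswap g (b*W+a) (b*W+(W-1-a))
  rw [eia, eib]
  simp only [PySem.List.pyGetD_natCast, PySem.List.pySetD_natCast]
  rfl

theorem bridge_ns (grid : List String) (W H : Nat) :
    ((PySem.List.pyRange 0 (W : Int) 1).flatMap (fun x =>
        (PySem.List.pyRange 0 (Int.tdiv (H : Int) 2) 1).map (fun y => (x, y)))).foldl
      (fun g (xy : Int × Int) =>
        PySem.List.pySetD (PySem.List.pySetD g (xy.2 * (W : Int) + xy.1)
            (PySem.List.pyGetD g (((H : Int) - 1 - xy.2) * (W : Int) + xy.1) ""))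
          (((H : Int) - 1 - xy.2) * (W : Int) + xy.1)
          (PySem.List.pyGetD g (xy.2 * (W : Int) + xy.1) "")) grid = nsLoop W H W grid := by
  rw [tdiv_cast, PySem.List.pyRange_zero_nat, PySem.List.pyRange_zero_nat]
  rw [List.foldl_flatMap, List.foldl_map]
  unfold nsLoop
  apply PySem.List.foldl_congr_mem
  intro acc a hmem
  have haW : a < W := List.mem_range.mp hmem
  rw [List.map_map, List.foldl_map]
  unfold nsInner
  apply PySem.List.foldl_congr_mem
  intro g b hb
  have hbH : b < H/2 := List.mem_range.mp hb
  have eia : (b : Int) * (W : Int) + (a : Int) = ((b*W+a : Nat) : Int) := by push_cast; ring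
  have eib : ((H : Int) - 1 - (b : Int)) * (W : Int) + (a : Int) = (((H-1-b)*W+a : Nat) : Int) := by
    have e : (((H-1-b)*W : Nat) : Int) = ((H-1-b : Nat) : Int) * (W : Int) := by push_cast; ring
    have e2 : ((H-1-b : Nat) : Int) = (H : Int) - 1 - (b : Int) := by omega
    push_cast [e, e2]
    ring
  show PySem.List.pySetD (PySem.List.pySetD g ((b:Int)*(W:Int)+(a:Int))
        (PySem.List.pyGetD g (((H:Int)-1-(b:Int))*(W:Int)+(a:Int)) ""))
      (((H:Int)-1-(b:Int))*(W:Int)+(a:Int)) (PySem.List.pyGetD g ((b:Int)*(W:Int)+(a:Int)) "")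
    = nswap g (b*W+a) ((H-1-b)*W+a)
  rw [eia, eib]
  simp only [PySem.List.pyGetD_natCast, PySem.List.pySetD_natCast]
  rfl

-- B-side bridges

theorem bridge_rows (grid : List String) (W H : Nat) :
    (PySem.List.pyRange 0 (H : Int) 1).map (fun y =>
        (PySem.List.pyRange 0 (W : Int) 1).map (fun x => PySem.List.pyGetD grid (y * (W : Int) + x) ""))
      = bRows grid W H := by
  rw [PySem.List.pyRange_zero_nat, PySem.List.pyRange_zero_nat, List.map_map]
  unfold bRows
  apply List.map_congr_left
  intro y _
  simp only [Function.comp, List.map_map]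
  unfold bRow
  apply List.map_congr_left
  intro x _
  have e : (y : Int) * (W : Int) + (x : Int) = ((y*W+x : Nat) : Int) := by push_cast; ring
  simp only [Function.comp, e, PySem.List.pyGetD_natCast]
  rfl

theorem foldl_write (cs : List String) :
    ∀ (g : List String) (i : Nat), i + cs.length ≤ g.length →
    cs.foldl (fun (st : List String × Int) c => (PySem.List.pySetD st.1 st.2 c, st.2 + 1)) (g, (i : Int))
      = (List.take i g ++ cs ++ List.drop (i + cs.length) g, ((i + cs.length : Nat) : Int)) := by
  induction cs with
  | nil => intro g i h; simp
  | cons c cs ih =>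
    intro g i h
    simp only [List.foldl_cons, PySem.List.pySetD_natCast]
    have hi : i < g.length := by simp at h; omega
    have e1 : ((i : Int) + 1) = ((i+1 : Nat) : Int) := by push_cast; ring
    rw [e1, ih (g.set i c) (i+1) (by simp at h ⊢; omega)]
    have hset : g.set i c = List.take i g ++ c :: List.drop (i+1) g := by
      rw [List.set_eq_take_append_cons_drop]; simp [hi]
    have htl : (List.take i g).length = i := by simp; omega
    rw [Prod.mk.injEq]
    refine ⟨?_, ?_⟩
    · rw [hset, List.take_append, List.take_of_length_le (show (List.take i g).length ≤ i+1 by omega), htl]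
      have e2 : i + 1 - i = 1 := by omega
      rw [e2]
      rw [List.drop_append, List.drop_of_length_le (show (List.take i g).length ≤ i+1+cs.length by omega), htl]
      have e3 : i + 1 + cs.length - i = cs.length + 1 := by omega
      rw [e3]
      simp only [List.take_succ_cons, List.take_zero, List.drop_succ_cons, List.drop_drop,
        List.length_cons, List.append_assoc, List.cons_append, List.nil_append]
      have e4 : i + 1 + cs.length = i + (cs.length + 1) := by omega
      rw [e4]
    · simp only [List.length_cons]
      omega

theorem flatten_rows_length {W : Nat} (rs : List (List String)) (hr : ∀ r ∈ rs, r.length = W) :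
    rs.flatten.length = rs.length * W := by
  induction rs with
  | nil => simp
  | cons r rs ih =>
    simp only [List.flatten_cons, List.length_append, List.length_cons]
    rw [hr r (by simp), ih (fun r hm => hr r (by simp [hm]))]
    ring

theorem nget_flatten {W : Nat} (rs : List (List String)) (hr : ∀ r ∈ rs, r.length = W) :
    ∀ (y x : Nat), y < rs.length → x < W →
    nget rs.flatten (y*W+x) = nget (rs.getD y []) x := by
  induction rs with
  | nil => intro y x hy _; simp at hy
  | cons r rs ih =>
    intro y x hy hx
    have hrW : r.length = W := hr r (by simp)
    cases y with
    | zero =>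
      simp only [List.flatten_cons, nget, List.getD_cons_zero, Nat.zero_mul, Nat.zero_add]
      rw [List.getD_append _ _ _ _ (by omega)]
    | succ y =>
      simp only [List.flatten_cons, nget, List.getD_cons_succ]
      rw [List.getD_append_right _ _ _ _ (by rw [hrW]; nlinarith [Nat.succ_mul y W])]
      have e : (y+1)*W + x - r.length = y*W+x := by rw [hrW, Nat.succ_mul]; omega
      rw [e]
      exact ih (fun r hm => hr r (by simp [hm])) y x (by simp at hy; omega) hx

theorem getD_reverse_str (l : List String) (y : Nat) (hy : y < l.length) :
    l.reverse.getD y "" = l.getD (l.length - 1 - y) "" := by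
  rw [List.getD_eq_getElem _ _ (by simpa using hy), List.getD_eq_getElem _ _ (by omega)]
  simp [List.getElem_reverse]

theorem getD_reverse_row (l : List (List String)) (y : Nat) (hy : y < l.length) :
    l.reverse.getD y [] = l.getD (l.length - 1 - y) [] := by
  rw [List.getD_eq_getElem _ _ (by simpa using hy), List.getD_eq_getElem _ _ (by omega)]
  simp [List.getElem_reverse]

theorem nget_bRow (grid : List String) (W y x : Nat) (hx : x < W) :
    nget (bRow grid W y) x = nget grid (y*W+x) := by
  unfold bRow nget
  rw [List.getD_eq_getElem _ _ (by simp [hx])]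
  simp

theorem bRows_getD (grid : List String) (W H y : Nat) (hy : y < H) :
    (bRows grid W H).getD y [] = bRow grid W y := by
  unfold bRows
  rw [List.getD_eq_getElem _ _ (by simp [hy])]
  simp

theorem degenerate_A (grid : List String) (w h_ : Int) (we ns : Bool) (hd : w ≤ 0 ∨ h_ ≤ 0) :
    flip_grid grid w h_ we ns = grid := by
  unfold flip_grid
  rcases hd with hw | hh
  · have h1 : PySem.List.pyRange 0 (Int.tdiv w 2) 1 = [] :=
      PySem.List.pyRange_one_eq_nil (by simpa using Int.tdiv_le_tdiv (by norm_num : (0:Int) < 2) hw)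
    have h2 : PySem.List.pyRange 0 w 1 = [] := PySem.List.pyRange_one_eq_nil hw
    cases we <;> cases ns <;> simp [h1, h2]
  · have h1 : PySem.List.pyRange 0 h_ 1 = [] := PySem.List.pyRange_one_eq_nil hh
    have h2 : PySem.List.pyRange 0 (Int.tdiv h_ 2) 1 = [] :=
      PySem.List.pyRange_one_eq_nil (by simpa using Int.tdiv_le_tdiv (by norm_num : (0:Int) < 2) hh)
    have h3 : (PySem.List.pyRange 0 w 1).flatMap (fun x =>
        (PySem.List.pyRange 0 (Int.tdiv h_ 2) 1).map (fun y => (x, y))) = [] := by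
      rw [h2]; simp
    have h4 : (PySem.List.pyRange 0 (Int.tdiv w 2) 1).flatMap (fun x =>
        (PySem.List.pyRange 0 h_ 1).map (fun y => (x, y))) = [] := by
      rw [h1]; simp
    cases we <;> cases ns <;> simp [h3, h4]

theorem degenerate_B (grid : List String) (w h_ : Int) (we ns : Bool) (hd : w ≤ 0 ∨ h_ ≤ 0) :
    flip_grid_alt grid w h_ we ns = grid := by
  unfold flip_grid_alt
  by_cases hf : (!we && !ns) = true
  · rw [if_pos hf]
  · rw [if_neg hf, if_pos hd]

theorem length_bRow (grid : List String) (W y : Nat) : (bRow grid W y).length = W := by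
  simp [bRow]

theorem length_bRows (grid : List String) (W H : Nat) : (bRows grid W H).length = H := by
  simp [bRows]

theorem getD_bRows_map_rev (grid : List String) (W H y : Nat) (hy : y < H) :
    ((bRows grid W H).map (fun r => r.reverse)).getD y [] = (bRow grid W y).reverse := by
  rw [List.getD_eq_getElem _ _ (by simp [bRows, hy])]
  simp [bRows, hy]

theorem nget_rev_bRow (grid : List String) (W y x : Nat) (hx : x < W) :
    nget (bRow grid W y).reverse x = nget grid (y*W+(W-1-x)) := by
  unfold nget
  rw [getD_reverse_str _ _ (by rw [length_bRow]; exact hx), length_bRow]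
  exact nget_bRow grid W y (W-1-x) (by omega)

theorem noflags_A (grid : List String) (w h_ : Int) :
    flip_grid grid w h_ false false = grid := by
  unfold flip_grid
  simp

theorem noflags_B (grid : List String) (w h_ : Int) :
    flip_grid_alt grid w h_ false false = grid := by
  unfold flip_grid_alt
  simp

theorem main_case (grid : List String) (W H : Nat) (hW : 0 < W) (hH : 0 < H)
    (hlen : grid.length = W*H) (we ns : Bool) :
    flip_grid grid (W : Int) (H : Int) we ns = flip_grid_alt grid (W : Int) (H : Int) we ns := by
  by_cases hf : (!we && !ns) = true
  · have hwe : we = false := by revert hf; cases we <;> cases ns <;> simp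
    have hns : ns = false := by revert hf; cases we <;> cases ns <;> simp
    subst hwe; subst hns
    rw [noflags_A, noflags_B]
  -- A side reduces to the Nat-level loops
  have hA : flip_grid grid (W : Int) (H : Int) we ns =
      (if ns then nsLoop W H W (if we then weLoop W H (W/2) grid else grid)
       else (if we then weLoop W H (W/2) grid else grid)) := by
    unfold flip_grid
    cases we <;> cases ns <;>
      simp only [Bool.false_eq_true, if_true, if_false, reduceIte]
    · rw [bridge_ns]
    · rw [bridge_we]
    · rw [bridge_we, bridge_ns]
  -- B side reduces to the flattened transformed rows
  have hrowsW : ∀ r ∈ (if ns then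
        (if we then (bRows grid W H).map (fun r => r.reverse) else bRows grid W H).reverse
        else (if we then (bRows grid W H).map (fun r => r.reverse) else bRows grid W H)),
      r.length = W := by
    intro r hr
    have hbase : ∀ r' ∈ bRows grid W H, r'.length = W := by
      intro r' hm
      obtain ⟨y0, _, rfl⟩ := List.mem_map.mp hm
      exact length_bRow grid W y0
    cases ns <;> cases we <;> simp only [Bool.false_eq_true, if_true, if_false, reduceIte,
        List.mem_reverse, List.mem_map] at hr
    · exact hbase r hr
    · obtain ⟨row, hrow, rfl⟩ := hr
      rw [List.length_reverse]
      exact hbase row hrow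
    · exact hbase r hr
    · obtain ⟨row, hrow, rfl⟩ := hr
      rw [List.length_reverse]
      exact hbase row hrow
  have hrowsLen : (if ns then
        (if we then (bRows grid W H).map (fun r => r.reverse) else bRows grid W H).reverse
        else (if we then (bRows grid W H).map (fun r => r.reverse) else bRows grid W H)).length = H := by
    cases ns <;> cases we <;> simp [length_bRows, bRows]
  have hflatlen : (if ns then
        (if we then (bRows grid W H).map (fun r => r.reverse) else bRows grid W H).reverse
        else (if we then (bRows grid W H).map (fun r => r.reverse) else bRows grid W H)).flatten.length
      = grid.length := by
    rw [flatten_rows_length _ hrowsW, hrowsLen, hlen, Nat.mul_comm]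
  have hBgen : ∀ rs : List (List String), rs.flatten.length = grid.length →
      (rs.foldl (fun (st : List String × Int) row =>
        row.foldl (fun st c => (PySem.List.pySetD st.1 st.2 c, st.2 + 1)) st) (grid, (0:Int))).1
        = rs.flatten := by
    intro rs hrs
    rw [← List.foldl_flatten]
    have h0 : (0 : Int) = ((0 : Nat) : Int) := by norm_num
    rw [h0, foldl_write _ grid 0 (by omega)]
    simp only [List.take_zero, List.nil_append, Nat.zero_add]
    rw [List.drop_of_length_le (by omega)]
    simp
  have hB : flip_grid_alt grid (W : Int) (H : Int) we ns =
      (if ns then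
        (if we then (bRows grid W H).map (fun r => r.reverse) else bRows grid W H).reverse
        else (if we then (bRows grid W H).map (fun r => r.reverse) else bRows grid W H)).flatten := by
    unfold flip_grid_alt
    rw [if_neg hf, if_neg (show ¬((W:Int) ≤ 0 ∨ (H:Int) ≤ 0) by omega)]
    rw [bridge_rows]
    show ((if ns then
        (if we then (bRows grid W H).map (fun row => row.reverse) else bRows grid W H).reverse
        else (if we then (bRows grid W H).map (fun row => row.reverse) else bRows grid W H)).foldl
          (fun (st : List String × Int) row =>
            row.foldl (fun st c => (PySem.List.pySetD st.1 st.2 c, st.2 + 1)) st) (grid, (0:Int))).1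
      = _
    exact hBgen _ hflatlen
  rw [hA, hB]
  -- lengths
  have hlenA : (if ns then nsLoop W H W (if we then weLoop W H (W/2) grid else grid)
       else (if we then weLoop W H (W/2) grid else grid)).length = grid.length := by
    cases ns <;> cases we <;>
      simp only [Bool.false_eq_true, if_true, if_false, length_nsLoop, length_weLoop]
  -- pointwise
  apply List.ext_getElem (by rw [hlenA, hflatlen])
  intro i hi1 hi2
  rw [← List.getD_eq_getElem _ "" hi1, ← List.getD_eq_getElem _ "" hi2]
  have hni : i < W*H := by rw [hlenA, hlen] at hi1; exact hi1
  have hdc : (i/W)*W + (i%W) = i := by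
    rw [Nat.mul_comm]
    exact Nat.div_add_mod i W
  have hy : i/W < H := by
    have : i < H*W := by rw [Nat.mul_comm] at hni; exact hni
    exact Nat.div_lt_iff_lt_mul hW |>.mpr this
  have hx : i%W < W := Nat.mod_lt i hW
  show nget _ i = nget _ i
  obtain ⟨y, x, hy2, hx2, rfl⟩ : ∃ y x, y < H ∧ x < W ∧ y*W+x = i :=
    ⟨i/W, i%W, hy, hx, hdc⟩
  -- B value
  have hBval : nget (if ns then
        (if we then (bRows grid W H).map (fun r => r.reverse) else bRows grid W H).reverse
        else (if we then (bRows grid W H).map (fun r => r.reverse) else bRows grid W H)).flatten (y*W+x)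
      = nget grid ((if ns then H-1-y else y)*W + (if we then W-1-x else x)) := by
    rw [nget_flatten _ hrowsW y x (by rw [hrowsLen]; exact hy2) hx2]
    cases ns <;> cases we <;> simp only [Bool.false_eq_true, if_true, if_false]
    · rw [bRows_getD grid W H y hy2]
      exact nget_bRow grid W y x hx2
    · rw [getD_bRows_map_rev grid W H y hy2]
      exact nget_rev_bRow grid W y x hx2
    · rw [getD_reverse_row _ _ (by rw [length_bRows]; exact hy2), length_bRows]
      rw [bRows_getD grid W H (H-1-y) (show H-1-y < H by omega)]
      exact nget_bRow grid W (H-1-y) x hx2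
    · rw [getD_reverse_row _ _ (by rw [List.length_map, length_bRows]; exact hy2),
         List.length_map, length_bRows]
      rw [getD_bRows_map_rev grid W H (H-1-y) (show H-1-y < H by omega)]
      exact nget_rev_bRow grid W (H-1-y) x hx2
  rw [hBval]
  -- A value
  cases ns <;> cases we <;> simp only [Bool.false_eq_true, if_true, if_false]
  · exact nget_weLoop_full W H grid hlen y x hy2 hx2
  · exact nget_nsLoop_full W H grid hlen y x hy2 hx2
  · rw [nget_nsLoop_full W H _ (by rw [length_weLoop]; exact hlen) y x hy2 hx2]
    exact nget_weLoop_full W H grid hlen (H-1-y) x (by omega) hx2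

-- ===== VERDICT (by name: the statement is the Claim_ definition above) =====
theorem flip_grid_spec : Claim_equal_flip_grid := by
  intro grid w h_ we ns _ hpre
  unfold Spec_flip_grid
  by_cases hf : we = false ∧ ns = false
  · obtain ⟨rfl, rfl⟩ := hf
    rw [noflags_A, noflags_B]
  by_cases hw : w ≤ 0
  · rw [degenerate_A _ _ _ _ _ (Or.inl hw), degenerate_B _ _ _ _ _ (Or.inl hw)]
  · by_cases hh : h_ ≤ 0
    · rw [degenerate_A _ _ _ _ _ (Or.inr hh), degenerate_B _ _ _ _ _ (Or.inr hh)]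
    · have hlen : (grid.length : Int) = w * h_ := by
        rcases hpre with h | h | h | h
        · exact absurd h hf
        · omega
        · omega
        · exact h
      obtain ⟨W, rfl⟩ : ∃ W : Nat, w = (W : Int) := ⟨w.toNat, (Int.toNat_of_nonneg (by omega)).symm⟩
      obtain ⟨H, rfl⟩ : ∃ H : Nat, h_ = (H : Int) := ⟨h_.toNat, (Int.toNat_of_nonneg (by omega)).symm⟩
      have hlen' : grid.length = W*H := by exact_mod_cast hlen
      exact main_case grid W H (by omega) (by omega) hlen' we ns
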